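-- pv_equiv track=rewrite | github.com/DataDog/datadog-unix-agent | aggregator/aggregator.py | _extract_magic_tags
-- ===== SOURCE A (Python) =====
-- def _extract_magic_tags(tags):
--     """Magic tags (host) override metric hostname attributes"""
--     hostname = None
--     # This implementation avoid list operations for the common case
--     if tags:
--         tags_to_remove = []
--         for tag in tags:
--             if tag.startswith('host:'):
--                 hostname = tag[5:]
--                 tags_to_remove.append(tag)
--         if tags_to_remove:
--             # tags is a tuple already sorted, we convert it into a list to pop elements
--             tags = list(tags)
--             for tag in tags_to_remove:
--                 tags.remove(tag)
--             tags = tuple(tags) or None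
--     return hostname, tags
-- ===== SOURCE B (Python) =====
-- def _extract_magic_tags(tags):
--     """Magic tags (host) override metric hostname attributes"""
--     filtered = tuple(t for t in tags if not t.startswith('host:'))
--     if len(filtered) == len(tags):
--         return None, tags
--     hostname = next(t[5:] for t in reversed(tags) if t.startswith('host:'))
--     return hostname, filtered or None
-- ===== Notes on version B (the rewrite author's own statement) =====
-- stated objective: idiomatic
-- what changed: Replaces A's collect-host-tags-then-list.remove-each scheme (a second pass calling remove per host tag) by a single filter comprehension building the non-host tuple plus a reversed-order search for the last host: tag.
import Mathlib
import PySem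

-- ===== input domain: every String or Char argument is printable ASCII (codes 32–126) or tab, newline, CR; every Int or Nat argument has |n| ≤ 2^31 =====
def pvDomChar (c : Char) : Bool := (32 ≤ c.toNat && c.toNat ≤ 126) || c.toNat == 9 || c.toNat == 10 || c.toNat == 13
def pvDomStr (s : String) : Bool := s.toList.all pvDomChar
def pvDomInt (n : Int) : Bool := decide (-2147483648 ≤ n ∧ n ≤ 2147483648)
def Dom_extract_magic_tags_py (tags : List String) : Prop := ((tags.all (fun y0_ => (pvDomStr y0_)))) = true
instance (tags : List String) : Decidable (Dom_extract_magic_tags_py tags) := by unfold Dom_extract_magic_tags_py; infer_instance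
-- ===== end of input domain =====

-- B replaces A's collect-then-remove scheme (list.remove per host tag) by one filter pass
-- plus a reversed search for the last host: tag: shorter and plainer (return value identical).


-- ===== PORT A =====
-- one step of the first loop: update hostname and tags_to_remove
def pvAStep (acc : Option String × List String) (tag : String) : Option String × List String :=
  if PySem.Str.startswith tag "host:" then (some (PySem.Str.slice tag (some 5) none), acc.2 ++ [tag])
  else acc

-- one step of 'for tag in tags_to_remove: tags.remove(tag)'; every removed tag is a member,
-- so remove? always succeeds and the .getD fallback is never taken (Python never raises here)
def pvARemove (t : List String) (tag : String) : List String :=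
  (PySem.List.remove? t tag).getD t

def extract_magic_tags_py (tags : List String) : Option String × Option (List String) :=
  if tags ≠ [] then
    let st := tags.foldl pvAStep (none, [])
    if st.2 ≠ [] then
      let tags2 := st.2.foldl pvARemove tags
      (st.1, if tags2 = [] then none else some tags2)
    else (st.1, some tags)
  else (none, some tags)

-- ===== PORT B =====
def extract_magic_tags_py_alt (tags : List String) : Option String × Option (List String) :=
  let filtered := tags.filter (fun t => !(PySem.Str.startswith t "host:"))
  if filtered.length = tags.length then (none, some tags)
  else ((tags.reverse.find? (fun t => PySem.Str.startswith t "host:")).map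
          (fun t => PySem.Str.slice t (some 5) none),
        if filtered = [] then none else some filtered)

-- ===== PRECONDITION & SPEC =====
def Spec_extract_magic_tags_py (tags : List String) (out : Option String × Option (List String)) : Prop := out = extract_magic_tags_py_alt tags
instance (tags : List String) (out : Option String × Option (List String)) : Decidable (Spec_extract_magic_tags_py tags out) := by unfold Spec_extract_magic_tags_py; infer_instance

-- ===== CLAIM (what is proved, stated in full; the proofs are below) =====
def Claim_equal_extract_magic_tags_py : Prop := ∀ (tags : List String), Dom_extract_magic_tags_py tags → Spec_extract_magic_tags_py tags (extract_magic_tags_py tags)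

-- ===== LEMMAS AND PROOFS =====

-- the predicate A tests
def pvP (t : String) : Bool := PySem.Str.startswith t "host:"

-- A's first loop splits into the last-match fold and the filter of host tags
theorem pvA_loop (tags : List String) (h : Option String) (l : List String) :
    tags.foldl pvAStep (h, l) =
      (tags.foldl (fun h t => if pvP t then some (PySem.Str.slice t (some 5) none) else h) h,
       l ++ tags.filter pvP) := by
  induction tags generalizing h l with
  | nil => simp
  | cons a tl ih =>
    by_cases hp : pvP a = true <;>
      simp [pvAStep, pvP, List.filter_cons] at * <;> simp [hp, ih]

-- the last-match fold is find? on the reversed list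
theorem pvHost_fold (tags : List String) (h : Option String) :
    tags.foldl (fun h t => if pvP t then some (PySem.Str.slice t (some 5) none) else h) h =
      ((tags.reverse.find? pvP).map (fun t => PySem.Str.slice t (some 5) none)).or h := by
  induction tags generalizing h with
  | nil => simp
  | cons a tl ih =>
    rw [List.foldl_cons, ih, List.reverse_cons, List.find?_append]
    by_cases hp : pvP a = true <;>
      cases hfs : tl.reverse.find? pvP <;> simp [List.find?, hp, Option.or]

-- removing a non-head element keeps the head
theorem pvRemove_cons (a y : String) (l : List String) (hne : y ≠ a) :
    pvARemove (a :: l) y = a :: pvARemove l y := by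
  unfold pvARemove
  rw [PySem.List.remove?_cons_of_ne l (fun h => hne h.symm)]
  cases PySem.List.remove? l y <;> simp

theorem pvRemove_fold_cons (ys : List String) (a : String) (l : List String)
    (hys : ∀ y ∈ ys, y ≠ a) :
    ys.foldl pvARemove (a :: l) = a :: ys.foldl pvARemove l := by
  induction ys generalizing l with
  | nil => simp
  | cons y tl ih =>
    rw [List.foldl_cons, List.foldl_cons, pvRemove_cons a y l (hys y (by simp))]
    exact ih _ (fun y hy => hys y (by simp [hy]))

-- removing every host tag in order is filtering them out
theorem pvRemove_fold (l : List String) :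
    (l.filter pvP).foldl pvARemove l = l.filter (fun t => !pvP t) := by
  induction l with
  | nil => simp
  | cons a tl ih =>
    by_cases hp : pvP a = true
    · rw [List.filter_cons_of_pos hp, List.foldl_cons]
      have : pvARemove (a :: tl) a = tl := by
        unfold pvARemove; rw [PySem.List.remove?_cons_self]; rfl
      rw [this, ih, List.filter_cons_of_neg (by simp [hp])]
    · rw [List.filter_cons_of_neg hp,
          pvRemove_fold_cons _ a tl (fun y hy => by
            have := List.of_mem_filter hy
            intro he; rw [he] at this; exact hp this),
          ih, List.filter_cons_of_pos (by simp [hp])]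

-- both ports restated through pvP (definitional)
theorem pvAlt_eq (tags : List String) :
    extract_magic_tags_py_alt tags =
      (if (tags.filter (fun t => !pvP t)).length = tags.length then (none, some tags)
       else ((tags.reverse.find? pvP).map (fun t => PySem.Str.slice t (some 5) none),
             if tags.filter (fun t => !pvP t) = [] then none
             else some (tags.filter (fun t => !pvP t)))) := rfl

-- ===== VERDICT (by name: the statement is the Claim_ definition above) =====
theorem extract_magic_tags_py_spec : Claim_equal_extract_magic_tags_py := by
  intro tags _
  unfold Spec_extract_magic_tags_py extract_magic_tags_py
  rw [pvAlt_eq]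
  have hlen := List.length_eq_length_filter_add (l := tags) pvP
  by_cases hnil : tags = []
  · subst hnil; simp
  · rw [if_pos hnil]
    show (if (tags.foldl pvAStep (none, [])).2 ≠ [] then _ else _) = _
    rw [pvA_loop tags none [], List.nil_append]
    by_cases hfp : tags.filter pvP = []
    · -- no host tag: both sides return (hostname-fold = none, tags)
      have hfind : tags.reverse.find? pvP = none := by
        rw [List.find?_eq_none]
        intro x hx
        exact List.filter_eq_nil_iff.mp hfp x (List.mem_reverse.mp hx)
      have hlenEq : (tags.filter (fun t => !pvP t)).length = tags.length := by
        rw [hlen, hfp]; simp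
      rw [if_neg (by simpa using hfp), if_pos hlenEq, pvHost_fold, hfind]
      rfl
    · -- at least one host tag
      have hlenNe : ¬ (tags.filter (fun t => !pvP t)).length = tags.length := by
        rw [hlen]
        have : 0 < (tags.filter pvP).length := List.length_pos_iff.mpr hfp
        omega
      rw [if_pos (by simpa using hfp), if_neg hlenNe]
      show (_, if (tags.filter pvP).foldl pvARemove tags = [] then _ else _) = _
      rw [pvRemove_fold, pvHost_fold, Option.or_none]
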